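-- pv_equiv track=rewrite | github.com/james5635/GeekForGeek-Data-Structure-and-Algorithm | string/increase_lcs_length.py | waysToIncreaseLCSOptimized
-- ===== SOURCE A (Python) =====
-- def waysToIncreaseLCSOptimized(str1, str2):
--     """
--     Optimized approach using LCS DP table analysis
--     """
--     m, n = len(str1), len(str2)
--
--     # dp[i][j] = LCS of str1[0..i-1] and str2[0..j-1]
--     dp = [[0] * (n + 1) for _ in range(m + 1)]
--
--     # dp2[i][j] = LCS of str1[i..m-1] and str2[j..n-1] (from the end)
--     dp2 = [[0] * (n + 1) for _ in range(m + 1)]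
--
--     # Fill dp table (forward)
--     for i in range(1, m + 1):
--         for j in range(1, n + 1):
--             if str1[i - 1] == str2[j - 1]:
--                 dp[i][j] = dp[i - 1][j - 1] + 1
--             else:
--                 dp[i][j] = max(dp[i - 1][j], dp[i][j - 1])
--
--     # Fill dp2 table (backward)
--     for i in range(m - 1, -1, -1):
--         for j in range(n - 1, -1, -1):
--             if str1[i] == str2[j]:
--                 dp2[i][j] = dp2[i + 1][j + 1] + 1
--             else:
--                 dp2[i][j] = max(dp2[i + 1][j], dp2[i][j + 1])
--
--     original_lcs = dp[m][n]
--     ways = 0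
--
--     # Check all positions where we could extend the LCS
--     for i in range(m + 1):
--         for j in range(n + 1):
--             for ch in set(str1 + str2):  # Only check characters that appear
--                 # Check if inserting 'ch' at position i in str1 increases LCS
--                 if i < m and str1[i] == ch:
--                     continue
--                 if j < n and str2[j] == ch:
--                     continue
--
--                 # Calculate new LCS if we match this character
--                 lcs_before = dp[i][j] if i > 0 and j > 0 else 0
--                 lcs_after = dp2[i][j] if i < m and j < n else 0
--
--                 if lcs_before + 1 + lcs_after == original_lcs + 1:
--                     ways += 1
--
--     return ways
-- ===== SOURCE B (Python) =====
-- def waysToIncreaseLCSOptimized(str1, str2):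
--     """Row-by-row LCS tables (backward table via reversed strings) and
--     arithmetic over the alphabet instead of a per-character inner loop."""
--
--     def lcs_rows(s1, s2):
--         n = len(s2)
--         rows = [[0] * (n + 1)]
--         for c1 in s1:
--             prev = rows[-1]
--             cur = [0]
--             for j, c2 in enumerate(s2):
--                 cur.append(prev[j] + 1 if c1 == c2 else max(prev[j + 1], cur[-1]))
--             rows.append(cur)
--         return rows
--
--     m, n = len(str1), len(str2)
--     fwd = lcs_rows(str1, str2)
--     rev = lcs_rows(str1[::-1], str2[::-1])
--     chars = set(str1) | set(str2)
--     k = len(chars)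
--     orig = fwd[m][n]
--     ways = 0
--     for i in range(m + 1):
--         for j in range(n + 1):
--             before = fwd[i][j] if i > 0 and j > 0 else 0
--             after = rev[m - i][n - j] if i < m and j < n else 0
--             if before + 1 + after == orig + 1:
--                 excluded = (1 if i < m else 0)
--                 if j < n and not (i < m and str1[i] == str2[j]):
--                     excluded += 1
--                 ways += k - excluded
--     return ways
-- ===== Notes on version B (the rewrite author's own statement) =====
-- stated objective: faster
-- what changed: B drops A's innermost loop over set(str1+str2): the success condition is character-independent, so B adds (alphabet size - number of excluded characters) per cell, and it builds the LCS tables row by row, obtaining the backward table from the reversed strings.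
import Mathlib
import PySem

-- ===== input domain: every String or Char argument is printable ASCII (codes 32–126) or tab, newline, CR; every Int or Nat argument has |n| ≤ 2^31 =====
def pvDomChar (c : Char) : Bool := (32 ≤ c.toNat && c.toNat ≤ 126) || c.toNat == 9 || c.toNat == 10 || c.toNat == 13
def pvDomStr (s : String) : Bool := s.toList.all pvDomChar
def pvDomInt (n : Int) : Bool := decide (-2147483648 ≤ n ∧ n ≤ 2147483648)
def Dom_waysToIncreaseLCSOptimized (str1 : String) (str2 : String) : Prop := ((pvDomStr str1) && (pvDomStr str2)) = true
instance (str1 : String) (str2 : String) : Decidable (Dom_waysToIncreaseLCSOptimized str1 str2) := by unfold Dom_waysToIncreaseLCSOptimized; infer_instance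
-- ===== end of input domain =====

-- B replaces A's per-character inner loop by alphabet-size arithmetic and builds the
-- two LCS tables row by row (the backward one from the reversed strings); objective: faster.

-- ===== PORT A =====
-- body of A's forward fill loop dp[i][j] = …; all indices are in range here, so the
-- total forms pyGetD/pySetD are exact, and str1[i-1]/str2[j-1] have 0 ≤ i-1 < len
def pvFwdCell (s1 s2 : List Char) (dp : List (List Int)) (ii jj : Int) : List (List Int) :=
  PySem.List.pySetD dp ii
    (PySem.List.pySetD (PySem.List.pyGetD dp ii []) jj
      (if s1.getD (ii - 1).toNat ' ' = s2.getD (jj - 1).toNat ' ' then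
         PySem.List.pyGetD (PySem.List.pyGetD dp (ii - 1) []) (jj - 1) 0 + 1
       else max (PySem.List.pyGetD (PySem.List.pyGetD dp (ii - 1) []) jj 0)
                (PySem.List.pyGetD (PySem.List.pyGetD dp ii []) (jj - 1) 0)))

-- body of A's backward fill loop dp2[i][j] = …; indices in range, total forms exact
def pvBwdCell (s1 s2 : List Char) (dp2 : List (List Int)) (ii jj : Int) : List (List Int) :=
  PySem.List.pySetD dp2 ii
    (PySem.List.pySetD (PySem.List.pyGetD dp2 ii []) jj
      (if s1.getD ii.toNat ' ' = s2.getD jj.toNat ' ' then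
         PySem.List.pyGetD (PySem.List.pyGetD dp2 (ii + 1) []) (jj + 1) 0 + 1
       else max (PySem.List.pyGetD (PySem.List.pyGetD dp2 (ii + 1) []) jj 0)
                (PySem.List.pyGetD (PySem.List.pyGetD dp2 ii []) (jj + 1) 0)))

def pvFillFwd (s1 s2 : List Char) : List (List Int) :=
  (PySem.List.pyRange 1 ((s1.length : Int) + 1)).foldl (fun dp ii =>
    (PySem.List.pyRange 1 ((s2.length : Int) + 1)).foldl (fun dp jj =>
      pvFwdCell s1 s2 dp ii jj) dp)
    (List.replicate (s1.length + 1) (List.replicate (s2.length + 1) 0))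

def pvFillBwd (s1 s2 : List Char) : List (List Int) :=
  (PySem.List.pyRange ((s1.length : Int) - 1) (-1) (-1)).foldl (fun dp2 ii =>
    (PySem.List.pyRange ((s2.length : Int) - 1) (-1) (-1)).foldl (fun dp2 jj =>
      pvBwdCell s1 s2 dp2 ii jj) dp2)
    (List.replicate (s1.length + 1) (List.replicate (s2.length + 1) 0))

-- the counting accumulates over set(str1+str2); the count is independent of the set's
-- (unmodelled) iteration order
def waysToIncreaseLCSOptimized (str1 : String) (str2 : String) : Int :=
  let s1 := str1.toList
  let s2 := str2.toList
  let m := s1.length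
  let n := s2.length
  let dp := pvFillFwd s1 s2
  let dp2 := pvFillBwd s1 s2
  let originalLcs := PySem.List.pyGetD (PySem.List.pyGetD dp (m : Int) []) (n : Int) 0
  let chars : PySem.Set Char := PySem.Set.ofList (s1 ++ s2)
  (PySem.List.pyRange 0 ((m : Int) + 1)).foldl (fun ways ii =>
    (PySem.List.pyRange 0 ((n : Int) + 1)).foldl (fun ways jj =>
      chars.foldl (fun ways ch =>
        let i : Nat := ii.toNat
        let j : Nat := jj.toNat
        if i < m ∧ s1.getD i ' ' = ch then ways
        else if j < n ∧ s2.getD j ' ' = ch then ways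
        else
          let lcsBefore := if 0 < i ∧ 0 < j then PySem.List.pyGetD (PySem.List.pyGetD dp ii []) jj 0 else 0
          let lcsAfter := if i < m ∧ j < n then PySem.List.pyGetD (PySem.List.pyGetD dp2 ii []) jj 0 else 0
          if lcsBefore + 1 + lcsAfter = originalLcs + 1 then ways + 1 else ways) ways) ways) 0

-- ===== PORT B =====
-- one row of the LCS table from the previous row; prev[j], prev[j+1], cur[-1] are in
-- range here, so pyGetD (the total form of pyGet?) is exact
def pvNextRow (prev : List Int) (c1 : Char) (s2 : List Char) : List Int :=
  (PySem.List.enumerate s2 0).foldl (fun cur jc =>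
    cur ++ [if c1 = jc.2 then PySem.List.pyGetD prev jc.1 0 + 1
            else max (PySem.List.pyGetD prev (jc.1 + 1) 0) (PySem.List.pyGetD cur (-1) 0)])
    [0]

def pvLcsRows (s1 s2 : List Char) : List (List Int) :=
  s1.foldl (fun rows c1 => rows ++ [pvNextRow (PySem.List.pyGetD rows (-1) []) c1 s2])
    [List.replicate (s2.length + 1) 0]

-- str1[::-1] is reversal; all fwd/rev lookups are in range, so pyGetD is exact
def waysToIncreaseLCSOptimized_alt (str1 : String) (str2 : String) : Int :=
  let s1 := str1.toList
  let s2 := str2.toList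
  let m := s1.length
  let n := s2.length
  let fwd := pvLcsRows s1 s2
  let rev := pvLcsRows s1.reverse s2.reverse
  let chars : PySem.Set Char := PySem.Set.union (PySem.Set.ofList s1) (PySem.Set.ofList s2)
  let k : Int := PySem.Set.len chars
  let orig := PySem.List.pyGetD (PySem.List.pyGetD fwd (m : Int) []) (n : Int) 0
  (PySem.List.pyRange 0 ((m : Int) + 1)).foldl (fun ways ii =>
    (PySem.List.pyRange 0 ((n : Int) + 1)).foldl (fun ways jj =>
      let i : Nat := ii.toNat
      let j : Nat := jj.toNat
      let before := if 0 < i ∧ 0 < j then PySem.List.pyGetD (PySem.List.pyGetD fwd (i : Int) []) (j : Int) 0 else 0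
      let after := if i < m ∧ j < n then
          PySem.List.pyGetD (PySem.List.pyGetD rev ((m - i : Nat) : Int) []) ((n - j : Nat) : Int) 0 else 0
      if before + 1 + after = orig + 1 then
        ways + (k - ((if i < m then 1 else 0) +
                     (if j < n ∧ ¬(i < m ∧ s1.getD i ' ' = s2.getD j ' ') then 1 else 0)))
      else ways) ways) 0

-- ===== PRECONDITION & SPEC =====
def Spec_waysToIncreaseLCSOptimized (str1 : String) (str2 : String) (out : Int) : Prop := out = waysToIncreaseLCSOptimized_alt str1 str2
instance (str1 : String) (str2 : String) (out : Int) : Decidable (Spec_waysToIncreaseLCSOptimized str1 str2 out) := by unfold Spec_waysToIncreaseLCSOptimized; infer_instance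

-- ===== CLAIM (what is proved, stated in full; the proofs are below) =====
def Claim_equal_waysToIncreaseLCSOptimized : Prop := ∀ (str1 : String) (str2 : String), Dom_waysToIncreaseLCSOptimized str1 str2 → Spec_waysToIncreaseLCSOptimized str1 str2 (waysToIncreaseLCSOptimized str1 str2)

-- ===== LEMMAS AND PROOFS =====

-- the LCS recurrence both programs' tables satisfy (branch shapes mirror the Python)
def pvLcs (s1 s2 : List Char) : Nat → Nat → Int
  | 0, _ => 0
  | _+1, 0 => 0
  | i+1, j+1 =>
    if s1.getD i ' ' = s2.getD j ' ' then pvLcs s1 s2 i j + 1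
    else max (pvLcs s1 s2 i (j+1)) (pvLcs s1 s2 (i+1) j)
  termination_by i j => i + j

lemma pvLcs_zero_left (s1 s2 : List Char) (j : Nat) : pvLcs s1 s2 0 j = 0 := by
  simp [pvLcs]

lemma pvLcs_zero_right (s1 s2 : List Char) (i : Nat) : pvLcs s1 s2 i 0 = 0 := by
  cases i <;> simp [pvLcs]

-- A's backward table value: LCS of the suffixes, expressed on the reversed strings
def pvS (s1 s2 : List Char) (a b : Nat) : Int :=
  pvLcs s1.reverse s2.reverse (s1.length - a) (s2.length - b)

lemma pvS_right (s1 s2 : List Char) (a : Nat) : pvS s1 s2 a s2.length = 0 := by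
  simp [pvS, pvLcs_zero_right]

lemma pvS_bottom (s1 s2 : List Char) (b : Nat) : pvS s1 s2 s1.length b = 0 := by
  simp [pvS, pvLcs_zero_left]

lemma pvS_rec (s1 s2 : List Char) (a b : Nat) (ha : a < s1.length) (hb : b < s2.length) :
    pvS s1 s2 a b = if s1.getD a ' ' = s2.getD b ' ' then pvS s1 s2 (a+1) (b+1) + 1
                    else max (pvS s1 s2 (a+1) b) (pvS s1 s2 a (b+1)) := by
  have hm : s1.length - a = (s1.length - (a+1)) + 1 := by omega
  have hn : s2.length - b = (s2.length - (b+1)) + 1 := by omega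
  have h1 : s1.reverse.getD (s1.length - (a+1)) ' ' = s1.getD a ' ' := by
    have hlt : s1.length - (a+1) < s1.reverse.length := by simp; omega
    rw [List.getD_eq_getElem _ _ hlt, List.getElem_reverse,
        List.getD_eq_getElem _ _ (show a < s1.length by omega)]
    congr 1; omega
  have h2 : s2.reverse.getD (s2.length - (b+1)) ' ' = s2.getD b ' ' := by
    have hlt : s2.length - (b+1) < s2.reverse.length := by simp; omega
    rw [List.getD_eq_getElem _ _ hlt, List.getElem_reverse,
        List.getD_eq_getElem _ _ (show b < s2.length by omega)]
    congr 1; omega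
  simp only [pvS, hm, hn]
  rw [pvLcs, h1, h2]

-- ---------- table access helpers for A's list-of-lists tables ----------
def pvTab (t : List (List Int)) (a b : Nat) : Int := (t.getD a []).getD b 0

def pvShape (t : List (List Int)) (M N : Nat) : Prop :=
  t.length = M ∧ ∀ r ∈ t, r.length = N

lemma pvGetD_set {α : Type} (xs : List α) (i : Nat) (v : α) (a : Nat) (d : α) (hi : i < xs.length) :
    (xs.set i v).getD a d = if a = i then v else xs.getD a d := by
  by_cases h : a = i
  · subst h
    rw [if_pos rfl, List.getD_eq_getElem _ _ (by simpa using hi)]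
    exact List.getElem_set_self _
  · rw [if_neg h, List.getD_eq_getElem?_getD, List.getElem?_set_ne (fun he => h he.symm),
        ← List.getD_eq_getElem?_getD]

lemma pvGetD_replicate {α : Type} (M : Nat) (x : α) (a : Nat) (d : α) :
    (List.replicate M x).getD a d = if a < M then x else d := by
  rw [List.getD_eq_getElem?_getD, List.getElem?_replicate]
  split_ifs <;> rfl

lemma pvTab_init (M N : Nat) (a b : Nat) :
    pvTab (List.replicate M (List.replicate N (0 : Int))) a b = 0 := by
  unfold pvTab
  rw [pvGetD_replicate]
  split_ifs
  · rw [pvGetD_replicate]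
    split_ifs <;> rfl
  · rfl

lemma pvShape_init (M N : Nat) :
    pvShape (List.replicate M (List.replicate N (0 : Int))) M N := by
  constructor
  · simp
  · intro r hr
    rw [List.eq_of_mem_replicate hr]
    simp

lemma pvShape_set (t : List (List Int)) (M N : Nat) (h : pvShape t M N) (i : Nat) (b : Nat) (v : Int)
    (hi : i < M) :
    pvShape (t.set i ((t.getD i []).set b v)) M N := by
  obtain ⟨hlen, hrows⟩ := h
  refine ⟨by simpa using hlen, ?_⟩
  intro r hr
  rcases List.mem_or_eq_of_mem_set hr with h' | h'
  · exact hrows r h'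
  · subst h'
    rw [List.length_set]
    apply hrows
    rw [List.getD_eq_getElem _ _ (by omega)]
    exact List.getElem_mem _

lemma pvTab_set (t : List (List Int)) (M N : Nat) (h : pvShape t M N) (i : Nat) (b : Nat) (v : Int)
    (hi : i < M) (hb : b < N) (a b' : Nat) :
    pvTab (t.set i ((t.getD i []).set b v)) a b'
      = if a = i ∧ b' = b then v else pvTab t a b' := by
  obtain ⟨hlen, hrows⟩ := h
  have hit : i < t.length := by omega
  have hrowlen : (t.getD i []).length = N := by
    apply hrows
    rw [List.getD_eq_getElem _ _ hit]
    exact List.getElem_mem _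
  unfold pvTab
  rw [pvGetD_set _ _ _ _ _ hit]
  by_cases ha : a = i
  · subst ha
    rw [if_pos rfl, pvGetD_set _ _ _ _ _ (by omega)]
    by_cases hb' : b' = b
    · subst hb'
      rw [if_pos rfl, if_pos ⟨rfl, rfl⟩]
    · rw [if_neg hb', if_neg (by intro hx; exact hb' hx.2)]
  · rw [if_neg ha, if_neg (by intro hx; exact ha hx.1)]

-- ---------- A's forward fill ----------
def pvFwdInvRow (s1 s2 : List Char) (i c : Nat) (t : List (List Int)) : Prop :=
  pvShape t (s1.length + 1) (s2.length + 1) ∧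
  (∀ a b, a < i → b ≤ s2.length → pvTab t a b = pvLcs s1 s2 a b) ∧
  (∀ b, b ≤ c → pvTab t i b = pvLcs s1 s2 i b) ∧
  (∀ a, pvTab t a 0 = 0)

lemma pvFwdCell_reduce (s1 s2 : List Char) (t : List (List Int)) (i c : Nat) (hi1 : 1 ≤ i) :
    pvFwdCell s1 s2 t (i : Int) ((c : Int) + 1)
      = t.set i ((t.getD i []).set (c+1)
          (if s1.getD (i-1) ' ' = s2.getD c ' ' then pvTab t (i-1) c + 1
           else max (pvTab t (i-1) (c+1)) (pvTab t i c))) := by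
  unfold pvFwdCell pvTab
  rw [show (i : Int) - 1 = ((i - 1 : Nat) : Int) by omega,
      show ((c : Int) + 1) - 1 = ((c : Nat) : Int) by ring,
      show ((c : Int) + 1) = ((c + 1 : Nat) : Int) by push_cast; ring]
  simp only [PySem.List.pySetD_natCast, PySem.List.pyGetD_natCast, Int.toNat_natCast]

lemma pvFwdCell_step (s1 s2 : List Char) (i c : Nat) (t : List (List Int))
    (hi1 : 1 ≤ i) (hi : i ≤ s1.length) (hc : c < s2.length)
    (h : pvFwdInvRow s1 s2 i c t) :
    pvFwdInvRow s1 s2 i (c+1) (pvFwdCell s1 s2 t (i : Int) ((c : Int) + 1)) := by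
  obtain ⟨hs, h1, h2, h3⟩ := h
  rw [pvFwdCell_reduce s1 s2 t i c hi1]
  obtain ⟨i', rfl⟩ : ∃ i', i = i' + 1 := ⟨i - 1, by omega⟩
  refine ⟨pvShape_set t _ _ hs _ _ _ (by omega), ?_, ?_, ?_⟩
  · intro a b hab hb
    rw [pvTab_set t _ _ hs (i'+1) (c+1) _ (by omega) (by omega), if_neg (by omega)]
    exact h1 a b hab hb
  · intro b hb
    rw [pvTab_set t _ _ hs (i'+1) (c+1) _ (by omega) (by omega)]
    by_cases hbe : b = c + 1
    · subst hbe
      rw [if_pos ⟨rfl, rfl⟩]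
      have e1 : pvTab t i' c = pvLcs s1 s2 i' c := h1 i' c (by omega) (by omega)
      have e2 : pvTab t i' (c+1) = pvLcs s1 s2 i' (c+1) := h1 i' (c+1) (by omega) (by omega)
      have e3 : pvTab t (i'+1) c = pvLcs s1 s2 (i'+1) c := h2 c (by omega)
      simp only [Nat.add_sub_cancel, e1, e2, e3]
      rw [pvLcs]
    · rw [if_neg (by omega)]
      exact h2 b (by omega)
  · intro a
    rw [pvTab_set t _ _ hs (i'+1) (c+1) _ (by omega) (by omega), if_neg (by omega)]
    exact h3 a

lemma pvFwd_row (s1 s2 : List Char) (i : Nat) (hi1 : 1 ≤ i) (hi : i ≤ s1.length) :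
    ∀ (c : Nat), c ≤ s2.length → ∀ t, pvFwdInvRow s1 s2 i 0 t →
    pvFwdInvRow s1 s2 i c
      ((PySem.List.pyRange 1 ((c : Int) + 1)).foldl (fun dp jj => pvFwdCell s1 s2 dp (i : Int) jj) t) := by
  intro c
  induction c with
  | zero =>
    intro _ t h
    rw [show ((0 : Nat) : Int) + 1 = 1 by norm_num,
        PySem.List.pyRange_one_eq_nil (a := 1) (b := 1) le_rfl]
    exact h
  | succ c ih =>
    intro hc t h
    rw [show ((c + 1 : Nat) : Int) + 1 = ((c : Int) + 1) + 1 by push_cast; ring,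
        PySem.List.pyRange_one_succ_right (a := 1) (b := (c : Int) + 1) (by omega), List.foldl_append,
        List.foldl_cons, List.foldl_nil]
    exact pvFwdCell_step s1 s2 i c _ hi1 hi (by omega) (ih (by omega) t h)

def pvFwdInv (s1 s2 : List Char) (r : Nat) (t : List (List Int)) : Prop :=
  pvShape t (s1.length + 1) (s2.length + 1) ∧
  (∀ a b, a ≤ r → b ≤ s2.length → pvTab t a b = pvLcs s1 s2 a b) ∧
  (∀ a, pvTab t a 0 = 0)

lemma pvFwd_outer (s1 s2 : List Char) :
    ∀ (r : Nat), r ≤ s1.length → ∀ t, pvFwdInv s1 s2 0 t →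
    pvFwdInv s1 s2 r
      ((PySem.List.pyRange 1 ((r : Int) + 1)).foldl (fun dp ii =>
        (PySem.List.pyRange 1 ((s2.length : Int) + 1)).foldl (fun dp jj =>
          pvFwdCell s1 s2 dp ii jj) dp) t) := by
  intro r
  induction r with
  | zero =>
    intro _ t h
    rw [show ((0 : Nat) : Int) + 1 = 1 by norm_num,
        PySem.List.pyRange_one_eq_nil (a := 1) (b := 1) le_rfl]
    exact h
  | succ r ih =>
    intro hr t h
    rw [show ((r + 1 : Nat) : Int) + 1 = ((r : Int) + 1) + 1 by push_cast; ring,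
        PySem.List.pyRange_one_succ_right (a := 1) (b := (r : Int) + 1) (by omega), List.foldl_append,
        List.foldl_cons, List.foldl_nil]
    obtain ⟨gs, g1, g2⟩ := ih (by omega) t h
    have hrow0 : pvFwdInvRow s1 s2 (r+1) 0
        ((PySem.List.pyRange 1 ((r : Int) + 1)).foldl (fun dp ii =>
          (PySem.List.pyRange 1 ((s2.length : Int) + 1)).foldl (fun dp jj =>
            pvFwdCell s1 s2 dp ii jj) dp) t) := by
      refine ⟨gs, fun a b hab hb => g1 a b (by omega) hb, fun b hb => ?_, g2⟩
      have : b = 0 := by omega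
      subst this
      rw [pvLcs_zero_right]
      exact g2 (r+1)
    have hrow := pvFwd_row s1 s2 (r+1) (by omega) (by omega) s2.length le_rfl _ hrow0
    rw [show ((r + 1 : Nat) : Int) = (r : Int) + 1 by push_cast; ring] at hrow
    obtain ⟨ws, w1, w2, w3⟩ := hrow
    refine ⟨ws, fun a b hab hb => ?_, w3⟩
    rcases Nat.lt_or_ge a (r+1) with h' | h'
    · exact w1 a b h' hb
    · have : a = r + 1 := by omega
      subst this
      exact w2 b hb

lemma pvFillFwd_eq (s1 s2 : List Char) (a b : Nat) (ha : a ≤ s1.length) (hb : b ≤ s2.length) :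
    pvTab (pvFillFwd s1 s2) a b = pvLcs s1 s2 a b := by
  have base : pvFwdInv s1 s2 0 (List.replicate (s1.length + 1) (List.replicate (s2.length + 1) 0)) := by
    refine ⟨pvShape_init _ _, fun a b ha _ => ?_, fun a => pvTab_init _ _ _ _⟩
    have : a = 0 := by omega
    subst this
    rw [pvLcs_zero_left, pvTab_init]
  exact (pvFwd_outer s1 s2 s1.length le_rfl _ base).2.1 a b ha hb

-- ---------- A's backward fill ----------
def pvBwdInvRow (s1 s2 : List Char) (a c : Nat) (t : List (List Int)) : Prop :=
  pvShape t (s1.length + 1) (s2.length + 1) ∧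
  (∀ a' b, a + 1 ≤ a' → a' ≤ s1.length → b ≤ s2.length → pvTab t a' b = pvS s1 s2 a' b) ∧
  (∀ b, c ≤ b → b ≤ s2.length → pvTab t a b = pvS s1 s2 a b) ∧
  (∀ a', pvTab t a' s2.length = 0)

lemma pvBwdCell_reduce (s1 s2 : List Char) (t : List (List Int)) (a c : Nat) :
    pvBwdCell s1 s2 t (a : Int) (c : Int)
      = t.set a ((t.getD a []).set c
          (if s1.getD a ' ' = s2.getD c ' ' then pvTab t (a+1) (c+1) + 1
           else max (pvTab t (a+1) c) (pvTab t a (c+1)))) := by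
  unfold pvBwdCell pvTab
  rw [show (a : Int) + 1 = ((a + 1 : Nat) : Int) by push_cast; ring,
      show (c : Int) + 1 = ((c + 1 : Nat) : Int) by push_cast; ring]
  simp only [PySem.List.pySetD_natCast, PySem.List.pyGetD_natCast, Int.toNat_natCast]

lemma pvBwdCell_step (s1 s2 : List Char) (a c : Nat) (t : List (List Int))
    (ha : a < s1.length) (hc : c < s2.length)
    (h : pvBwdInvRow s1 s2 a (c+1) t) :
    pvBwdInvRow s1 s2 a c (pvBwdCell s1 s2 t (a : Int) (c : Int)) := by
  obtain ⟨hs, h1, h2, h3⟩ := h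
  rw [pvBwdCell_reduce]
  refine ⟨pvShape_set t _ _ hs _ _ _ (by omega), ?_, ?_, ?_⟩
  · intro a' b ha' hb hbn
    rw [pvTab_set t _ _ hs a c _ (by omega) (by omega), if_neg (by omega)]
    exact h1 a' b ha' hb hbn
  · intro b hb hbn
    rw [pvTab_set t _ _ hs a c _ (by omega) (by omega)]
    by_cases hbe : b = c
    · subst hbe
      rw [if_pos ⟨rfl, rfl⟩]
      have e1 : pvTab t (a+1) (b+1) = pvS s1 s2 (a+1) (b+1) := h1 (a+1) (b+1) le_rfl (by omega) (by omega)
      have e2 : pvTab t (a+1) b = pvS s1 s2 (a+1) b := h1 (a+1) b le_rfl (by omega) (by omega)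
      have e3 : pvTab t a (b+1) = pvS s1 s2 a (b+1) := h2 (b+1) (by omega) (by omega)
      rw [e1, e2, e3, ← pvS_rec s1 s2 a b ha hc]
    · rw [if_neg (by omega)]
      exact h2 b (by omega) hbn
  · intro a'
    rw [pvTab_set t _ _ hs a c _ (by omega) (by omega), if_neg (by omega)]
    exact h3 a'

lemma pvBwd_row (s1 s2 : List Char) (a : Nat) (ha : a < s1.length) :
    ∀ (c : Nat), c ≤ s2.length → ∀ t, pvBwdInvRow s1 s2 a c t →
    pvBwdInvRow s1 s2 a 0
      ((PySem.List.pyRange ((c : Int) - 1) (-1) (-1)).foldl (fun dp2 jj => pvBwdCell s1 s2 dp2 (a : Int) jj) t) := by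
  intro c
  induction c with
  | zero =>
    intro _ t h
    rw [show ((0 : Nat) : Int) - 1 = -1 by norm_num,
        PySem.List.pyRange_neg_one_eq_nil (a := -1) (b := -1) le_rfl]
    exact h
  | succ c ih =>
    intro hc t h
    rw [show ((c + 1 : Nat) : Int) - 1 = (c : Int) by push_cast; ring,
        PySem.List.pyRange_neg_one_cons (a := (c : Int)) (b := -1) (by omega), List.foldl_cons]
    exact ih (by omega) _ (pvBwdCell_step s1 s2 a c t ha (by omega) h)

def pvBwdInv (s1 s2 : List Char) (r : Nat) (t : List (List Int)) : Prop :=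
  pvShape t (s1.length + 1) (s2.length + 1) ∧
  (∀ a b, r ≤ a → a ≤ s1.length → b ≤ s2.length → pvTab t a b = pvS s1 s2 a b) ∧
  (∀ a, pvTab t a s2.length = 0)

lemma pvBwd_outer (s1 s2 : List Char) :
    ∀ (r : Nat), r ≤ s1.length → ∀ t, pvBwdInv s1 s2 r t →
    pvBwdInv s1 s2 0
      ((PySem.List.pyRange ((r : Int) - 1) (-1) (-1)).foldl (fun dp2 ii =>
        (PySem.List.pyRange ((s2.length : Int) - 1) (-1) (-1)).foldl (fun dp2 jj =>
          pvBwdCell s1 s2 dp2 ii jj) dp2) t) := by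
  intro r
  induction r with
  | zero =>
    intro _ t h
    rw [show ((0 : Nat) : Int) - 1 = -1 by norm_num,
        PySem.List.pyRange_neg_one_eq_nil (a := -1) (b := -1) le_rfl]
    exact h
  | succ r ih =>
    intro hr t h
    rw [show ((r + 1 : Nat) : Int) - 1 = (r : Int) by push_cast; ring,
        PySem.List.pyRange_neg_one_cons (a := (r : Int)) (b := -1) (by omega), List.foldl_cons]
    obtain ⟨gs, g1, g2⟩ := h
    have hrow : pvBwdInvRow s1 s2 r s2.length t := by
      refine ⟨gs, fun a' b ha' hb hbn => g1 a' b (by omega) hb hbn, fun b hb hbn => ?_, g2⟩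
      have : b = s2.length := by omega
      subst this
      rw [pvS_right]
      exact g2 r
    obtain ⟨ws, w1, w2, w3⟩ := pvBwd_row s1 s2 r (by omega) s2.length le_rfl t hrow
    refine ih (by omega) _ ⟨ws, fun a b hra hb hbn => ?_, w3⟩
    rcases Nat.lt_or_ge r a with h' | h'
    · exact w1 a b (by omega) hb hbn
    · have : a = r := by omega
      subst this
      exact w2 b (Nat.zero_le b) hbn

lemma pvFillBwd_eq (s1 s2 : List Char) (a b : Nat) (ha : a ≤ s1.length) (hb : b ≤ s2.length) :
    pvTab (pvFillBwd s1 s2) a b = pvS s1 s2 a b := by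
  have base : pvBwdInv s1 s2 s1.length (List.replicate (s1.length + 1) (List.replicate (s2.length + 1) 0)) := by
    refine ⟨pvShape_init _ _, fun a b ha' hb _ => ?_, fun a => pvTab_init _ _ _ _⟩
    have : a = s1.length := by omega
    subst this
    rw [pvS_bottom, pvTab_init]
  exact (pvBwd_outer s1 s2 s1.length le_rfl _ base).2.1 a b (Nat.zero_le a) ha hb

-- ---------- B's rows ----------
lemma pvNextRow_go (s1 s2 : List Char) (i : Nat) :
    ∀ (l : List Char) (s : Nat), l = s2.drop s → s ≤ s2.length →
    (PySem.List.enumerate l (s : Int)).foldl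
        (fun cur jc =>
          cur ++ [if s1.getD i ' ' = jc.2 then
                    PySem.List.pyGetD ((List.range (s2.length + 1)).map (fun j => pvLcs s1 s2 i j)) jc.1 0 + 1
                  else max (PySem.List.pyGetD ((List.range (s2.length + 1)).map (fun j => pvLcs s1 s2 i j)) (jc.1 + 1) 0)
                           (PySem.List.pyGetD cur (-1) 0)])
        ((List.range (s + 1)).map (fun j => pvLcs s1 s2 (i+1) j))
      = (List.range (s2.length + 1)).map (fun j => pvLcs s1 s2 (i+1) j) := by
  intro l
  induction l with
  | nil =>
    intro s hdrop hs
    have hsn : s = s2.length := by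
      have := congrArg List.length hdrop
      simp at this
      omega
    subst hsn
    simp [PySem.List.enumerate_nil]
  | cons ch l' ih =>
    intro s hdrop hs
    have hs' : s < s2.length := by
      have := congrArg List.length hdrop
      simp at this
      omega
    have hch : s2.getD s ' ' = ch := by
      have h0 : s2[s]? = some ch := by
        have h1 : (s2.drop s)[0]? = some ch := by rw [← hdrop]; rfl
        rwa [List.getElem?_drop, Nat.add_zero] at h1
      simp [List.getD_eq_getElem?_getD, h0]
    have hl' : l' = s2.drop (s+1) := by
      have := congrArg List.tail hdrop
      simpa [List.tail_drop] using this
    subst hch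
    rw [PySem.List.enumerate_cons]
    simp only [List.foldl_cons]
    have e1 : PySem.List.pyGetD ((List.range (s2.length + 1)).map (fun j => pvLcs s1 s2 i j)) ((s : Int)) 0
        = pvLcs s1 s2 i s := by
      rw [PySem.List.pyGetD_natCast]
      exact PySem.List.getD_map_range _ _ _ _ (by omega)
    have e2 : PySem.List.pyGetD ((List.range (s2.length + 1)).map (fun j => pvLcs s1 s2 i j)) ((s : Int) + 1) 0
        = pvLcs s1 s2 i (s+1) := by
      rw [show ((s : Int) + 1) = ((s + 1 : Nat) : Int) by push_cast; ring, PySem.List.pyGetD_natCast]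
      exact PySem.List.getD_map_range _ _ _ _ (by omega)
    have e3 : PySem.List.pyGetD ((List.range (s + 1)).map (fun j => pvLcs s1 s2 (i+1) j)) (-1) 0
        = pvLcs s1 s2 (i+1) s := by
      have hne : ((List.range (s + 1)).map (fun j => pvLcs s1 s2 (i+1) j)) ≠ [] := by simp
      rw [PySem.List.pyGetD_neg_one _ _ hne, List.getLast_eq_getElem]
      simp
    rw [e1, e2, e3]
    have hv : (if s1.getD i ' ' = s2.getD s ' ' then pvLcs s1 s2 i s + 1
               else max (pvLcs s1 s2 i (s+1)) (pvLcs s1 s2 (i+1) s)) = pvLcs s1 s2 (i+1) (s+1) := by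
      conv_rhs => rw [pvLcs]
    rw [hv,
        show (List.range (s + 1)).map (fun j => pvLcs s1 s2 (i+1) j) ++ [pvLcs s1 s2 (i+1) (s+1)]
           = (List.range (s + 1 + 1)).map (fun j => pvLcs s1 s2 (i+1) j) by
          rw [List.range_succ (n := s + 1)]; simp,
        show (s : Int) + 1 = ((s + 1 : Nat) : Int) by push_cast; ring]
    exact ih (s+1) hl' (by omega)

lemma pvNextRow_spec (s1 s2 : List Char) (i : Nat) (_hi : i < s1.length) :
    pvNextRow ((List.range (s2.length + 1)).map (fun j => pvLcs s1 s2 i j)) (s1.getD i ' ') s2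
      = (List.range (s2.length + 1)).map (fun j => pvLcs s1 s2 (i+1) j) := by
  unfold pvNextRow
  have h := pvNextRow_go s1 s2 i s2 0 (by simp) (by omega)
  simp only [Nat.cast_zero] at h
  have h0 : (List.range (0 + 1)).map (fun j => pvLcs s1 s2 (i+1) j) = [(0 : Int)] := by
    simp [pvLcs_zero_right]
  rw [h0] at h
  exact h

lemma pvLcsRows_eq (s1 s2 : List Char) :
    pvLcsRows s1 s2
      = (List.range (s1.length + 1)).map (fun i =>
          (List.range (s2.length + 1)).map (fun j => pvLcs s1 s2 i j)) := by
  have go : ∀ (l : List Char) (p : Nat), l = s1.drop p → p ≤ s1.length →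
      l.foldl (fun rows c1 => rows ++ [pvNextRow (PySem.List.pyGetD rows (-1) []) c1 s2])
        ((List.range (p + 1)).map (fun i => (List.range (s2.length + 1)).map (fun j => pvLcs s1 s2 i j)))
        = (List.range (s1.length + 1)).map (fun i =>
            (List.range (s2.length + 1)).map (fun j => pvLcs s1 s2 i j)) := by
    intro l
    induction l with
    | nil =>
      intro p hdrop hp
      have hpm : p = s1.length := by
        have := congrArg List.length hdrop
        simp at this
        omega
      subst hpm
      simp
    | cons c1 l' ih =>
      intro p hdrop hp
      have hp' : p < s1.length := by
        have := congrArg List.length hdrop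
        simp at this
        omega
      have hc1 : s1.getD p ' ' = c1 := by
        have h0 : s1[p]? = some c1 := by
          have h1 : (s1.drop p)[0]? = some c1 := by rw [← hdrop]; rfl
          rwa [List.getElem?_drop, Nat.add_zero] at h1
        simp [List.getD_eq_getElem?_getD, h0]
      have hl' : l' = s1.drop (p+1) := by
        have := congrArg List.tail hdrop
        simpa [List.tail_drop] using this
      subst hc1
      simp only [List.foldl_cons]
      have hlast : PySem.List.pyGetD
          ((List.range (p + 1)).map (fun i => (List.range (s2.length + 1)).map (fun j => pvLcs s1 s2 i j))) (-1) []
          = (List.range (s2.length + 1)).map (fun j => pvLcs s1 s2 p j) := by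
        have hne : ((List.range (p + 1)).map (fun i => (List.range (s2.length + 1)).map (fun j => pvLcs s1 s2 i j))) ≠ [] := by simp
        rw [PySem.List.pyGetD_neg_one _ _ hne, List.getLast_eq_getElem]
        simp
      rw [hlast, pvNextRow_spec s1 s2 p hp',
          show (List.range (p + 1)).map (fun i => (List.range (s2.length + 1)).map (fun j => pvLcs s1 s2 i j))
              ++ [(List.range (s2.length + 1)).map (fun j => pvLcs s1 s2 (p+1) j)]
             = (List.range (p + 1 + 1)).map (fun i => (List.range (s2.length + 1)).map (fun j => pvLcs s1 s2 i j)) by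
            rw [List.range_succ (n := p + 1)]; simp]
      exact ih (p+1) hl' (by omega)
  unfold pvLcsRows
  have h := go s1 0 (by simp) (by omega)
  have h0 : (List.range (0 + 1)).map (fun i => (List.range (s2.length + 1)).map (fun j => pvLcs s1 s2 i j))
      = [List.replicate (s2.length + 1) 0] := by
    simp [pvLcs_zero_left, List.map_const']
  rw [h0] at h
  exact h

-- ---------- counting ----------
def pvSkip (s1 s2 : List Char) (i j : Nat) (ch : Char) : Bool :=
  decide (i < s1.length ∧ s1.getD i ' ' = ch) || decide (j < s2.length ∧ s2.getD j ' ' = ch)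

def pvExcl (s1 s2 : List Char) (i j : Nat) : Int :=
  (if i < s1.length then 1 else 0) +
  (if j < s2.length ∧ ¬(i < s1.length ∧ s1.getD i ' ' = s2.getD j ' ') then 1 else 0)

lemma countP_single (c : Char) :
    ∀ (S : List Char), S.Nodup → c ∈ S → S.countP (fun ch => decide (c = ch)) = 1 := by
  intro S
  induction S with
  | nil => intro _ hc; simp at hc
  | cons x xs ih =>
    intro hn hc
    rw [List.nodup_cons] at hn
    rw [List.countP_cons]
    rcases List.mem_cons.mp hc with h | h
    · subst h
      have h0 : xs.countP (fun ch => decide (c = ch)) = 0 := by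
        rw [List.countP_eq_zero]
        intro a ha
        simp only [decide_eq_true_eq]
        rintro rfl
        exact hn.1 ha
      simp [h0]
    · have h0 : (decide (c = x) : Bool) = false := by
        simp only [decide_eq_false_iff_not]
        rintro rfl
        exact hn.1 h
      rw [ih hn.2 h, h0]
      simp

lemma countP_pair (c1 c2 : Char) (hne : c1 ≠ c2) :
    ∀ (S : List Char), S.Nodup → c1 ∈ S → c2 ∈ S →
    S.countP (fun ch => decide (c1 = ch) || decide (c2 = ch)) = 2 := by
  intro S
  induction S with
  | nil => intro _ h1 _; simp at h1
  | cons x xs ih =>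
    intro hn h1 h2
    rw [List.nodup_cons] at hn
    rw [List.countP_cons]
    rcases List.mem_cons.mp h1 with e1 | e1
    · subst e1
      have hc2 : c2 ∈ xs := by
        rcases List.mem_cons.mp h2 with e | e
        · exact absurd e.symm hne
        · exact e
      have hcg : xs.countP (fun ch => decide (c1 = ch) || decide (c2 = ch))
          = xs.countP (fun ch => decide (c2 = ch)) := by
        apply List.countP_congr
        intro a ha
        have hf : (decide (c1 = a) : Bool) = false := by
          simp only [decide_eq_false_iff_not]
          rintro rfl
          exact hn.1 ha
        simp [hf]
      rw [hcg, countP_single c2 xs hn.2 hc2]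
      simp
    · rcases List.mem_cons.mp h2 with e2 | e2
      · subst e2
        have hcg : xs.countP (fun ch => decide (c1 = ch) || decide (c2 = ch))
            = xs.countP (fun ch => decide (c1 = ch)) := by
          apply List.countP_congr
          intro a ha
          have hf : (decide (c2 = a) : Bool) = false := by
            simp only [decide_eq_false_iff_not]
            rintro rfl
            exact hn.1 ha
          simp [hf]
        rw [hcg, countP_single c1 xs hn.2 e1]
        simp
      · have hx : ((decide (c1 = x) : Bool) || decide (c2 = x)) = false := by
          simp only [Bool.or_eq_false_iff, decide_eq_false_iff_not]
          constructor
          · rintro rfl; exact hn.1 e1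
          · rintro rfl; exact hn.1 e2
        rw [ih hn.2 e1 e2, hx]
        simp

lemma pvSkip_count (s1 s2 : List Char) (i j : Nat) :
    ((PySem.Set.ofList (s1 ++ s2)).countP (pvSkip s1 s2 i j) : Int) = pvExcl s1 s2 i j := by
  have hn := PySem.Set.nodup_ofList (s1 ++ s2)
  by_cases him : i < s1.length
  · have hm1 : s1.getD i ' ' ∈ PySem.Set.ofList (s1 ++ s2) := by
      rw [PySem.Set.mem_ofList]
      apply List.mem_append_left
      rw [List.getD_eq_getElem _ _ him]
      exact List.getElem_mem _
    by_cases hjn : j < s2.length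
    · have hm2 : s2.getD j ' ' ∈ PySem.Set.ofList (s1 ++ s2) := by
        rw [PySem.Set.mem_ofList]
        apply List.mem_append_right
        rw [List.getD_eq_getElem _ _ hjn]
        exact List.getElem_mem _
      by_cases heq : s1.getD i ' ' = s2.getD j ' '
      · have hp : ∀ a ∈ PySem.Set.ofList (s1 ++ s2),
            pvSkip s1 s2 i j a = decide (s1.getD i ' ' = a) := by
          intro a _
          simp only [pvSkip]
          rw [heq]
          simp only [him, hjn, true_and, Bool.or_self]
        rw [List.countP_congr (fun x hx => by rw [hp x hx]), countP_single _ _ hn hm1]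
        unfold pvExcl
        rw [if_pos him, if_neg (fun h => h.2 ⟨him, heq⟩)]
        norm_num
      · have hp : ∀ a ∈ PySem.Set.ofList (s1 ++ s2),
            pvSkip s1 s2 i j a = (decide (s1.getD i ' ' = a) || decide (s2.getD j ' ' = a)) := by
          intro a _
          simp [pvSkip, him, hjn]
        rw [List.countP_congr (fun x hx => by rw [hp x hx]), countP_pair _ _ heq _ hn hm1 hm2]
        unfold pvExcl
        rw [if_pos him, if_pos ⟨hjn, fun h => heq h.2⟩]
        norm_num
    · have hp : ∀ a ∈ PySem.Set.ofList (s1 ++ s2),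
          pvSkip s1 s2 i j a = decide (s1.getD i ' ' = a) := by
        intro a _
        simp [pvSkip, him, hjn]
      rw [List.countP_congr (fun x hx => by rw [hp x hx]), countP_single _ _ hn hm1]
      unfold pvExcl
      rw [if_pos him, if_neg (fun h => hjn h.1)]
      norm_num
  · by_cases hjn : j < s2.length
    · have hm2 : s2.getD j ' ' ∈ PySem.Set.ofList (s1 ++ s2) := by
        rw [PySem.Set.mem_ofList]
        apply List.mem_append_right
        rw [List.getD_eq_getElem _ _ hjn]
        exact List.getElem_mem _
      have hp : ∀ a ∈ PySem.Set.ofList (s1 ++ s2),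
          pvSkip s1 s2 i j a = decide (s2.getD j ' ' = a) := by
        intro a _
        simp [pvSkip, him, hjn]
      rw [List.countP_congr (fun x hx => by rw [hp x hx]), countP_single _ _ hn hm2]
      unfold pvExcl
      rw [if_neg him, if_pos ⟨hjn, fun h => him h.1⟩]
      norm_num
    · have hp : ∀ a ∈ PySem.Set.ofList (s1 ++ s2),
          pvSkip s1 s2 i j a = false := by
        intro a _
        simp [pvSkip, him, hjn]
      have hzero : (PySem.Set.ofList (s1 ++ s2)).countP (pvSkip s1 s2 i j) = 0 :=
        List.countP_eq_zero.mpr (fun a ha => by rw [hp a ha]; exact Bool.false_ne_true)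
      rw [hzero]
      unfold pvExcl
      rw [if_neg him, if_neg (fun h => hjn h.1)]
      norm_num

lemma pvLen_union (s1 s2 : List Char) :
    ((PySem.Set.ofList s1).union (PySem.Set.ofList s2)).length
      = (PySem.Set.ofList (s1 ++ s2)).length := by
  have h1 : List.Nodup ((PySem.Set.ofList s1).union (PySem.Set.ofList s2)) :=
    PySem.Set.nodup_union _ _ (PySem.Set.nodup_ofList s1)
  have h2 := PySem.Set.nodup_ofList (s1 ++ s2)
  have hp : ((PySem.Set.ofList s1).union (PySem.Set.ofList s2)).Perm (PySem.Set.ofList (s1 ++ s2)) := by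
    rw [List.perm_ext_iff_of_nodup h1 h2]
    intro a
    rw [PySem.Set.mem_union, PySem.Set.mem_ofList, PySem.Set.mem_ofList, PySem.Set.mem_ofList,
        List.mem_append]
  exact hp.length_eq

-- A's char loop, closed form: adds (alphabet size − excluded) when the condition holds
lemma pvCharFold (s1 s2 : List Char) (i j : Nat) (C : Prop) [Decidable C] (w : Int) :
    (PySem.Set.ofList (s1 ++ s2)).foldl (fun w ch =>
        if i < s1.length ∧ s1.getD i ' ' = ch then w
        else if j < s2.length ∧ s2.getD j ' ' = ch then w
        else if C then w + 1 else w) w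
      = if C then w + (((PySem.Set.ofList (s1 ++ s2)).length : Int) - pvExcl s1 s2 i j) else w := by
  by_cases hC : C
  · have hb : ∀ (acc : Int), ∀ x ∈ PySem.Set.ofList (s1 ++ s2),
        (if i < s1.length ∧ s1.getD i ' ' = x then acc
         else if j < s2.length ∧ s2.getD j ' ' = x then acc
         else if C then acc + 1 else acc)
        = (if (!pvSkip s1 s2 i j x) = true then acc + 1 else acc) := by
      intro acc x _
      by_cases t1 : i < s1.length ∧ s1.getD i ' ' = x
      · rw [if_pos t1]
        have ht : pvSkip s1 s2 i j x = true := by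
          simp only [pvSkip, Bool.or_eq_true, decide_eq_true_eq]
          exact Or.inl t1
        rw [ht]
        simp
      · rw [if_neg t1]
        by_cases t2 : j < s2.length ∧ s2.getD j ' ' = x
        · rw [if_pos t2]
          have ht : pvSkip s1 s2 i j x = true := by
            simp only [pvSkip, Bool.or_eq_true, decide_eq_true_eq]
            exact Or.inr t2
          rw [ht]
          simp
        · rw [if_neg t2, if_pos hC]
          have ht : pvSkip s1 s2 i j x = false := by
            simp only [pvSkip, Bool.or_eq_false_iff, decide_eq_false_iff_not]
            exact ⟨t1, t2⟩
          rw [ht]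
          simp
    rw [PySem.List.foldl_congr_mem _ _ _ _ hb, PySem.List.foldl_count_if]
    have hcount : (PySem.Set.ofList (s1 ++ s2)).countP (fun x => !pvSkip s1 s2 i j x)
        = (PySem.Set.ofList (s1 ++ s2)).length - (PySem.Set.ofList (s1 ++ s2)).countP (pvSkip s1 s2 i j) := by
      have hlen := List.length_eq_countP_add_countP (l := PySem.Set.ofList (s1 ++ s2)) (pvSkip s1 s2 i j)
      have he : (PySem.Set.ofList (s1 ++ s2)).countP (fun a => decide ¬ pvSkip s1 s2 i j a = true)
          = (PySem.Set.ofList (s1 ++ s2)).countP (fun x => !pvSkip s1 s2 i j x) := by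
        apply List.countP_congr
        intro x _
        simp
      omega
    have hle : (PySem.Set.ofList (s1 ++ s2)).countP (pvSkip s1 s2 i j)
        ≤ (PySem.Set.ofList (s1 ++ s2)).length := List.countP_le_length
    have hskip := pvSkip_count s1 s2 i j
    rw [if_pos hC, hcount, Nat.cast_sub hle, hskip]
  · have hb : ∀ (acc : Int), ∀ x ∈ PySem.Set.ofList (s1 ++ s2),
        (if i < s1.length ∧ s1.getD i ' ' = x then acc
         else if j < s2.length ∧ s2.getD j ' ' = x then acc
         else if C then acc + 1 else acc)
        = ((fun (a : Int) (_ : Char) => a) acc x) := by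
      intro acc x _
      simp only
      split_ifs <;> rfl
    rw [PySem.List.foldl_congr_mem _ _ _ _ hb, if_neg hC]
    generalize PySem.Set.ofList (s1 ++ s2) = L
    induction L generalizing w with
    | nil => rfl
    | cons y ys ih => simp [ih]

lemma pvMain (str1 str2 : String) :
    waysToIncreaseLCSOptimized str1 str2 = waysToIncreaseLCSOptimized_alt str1 str2 := by
  simp only [waysToIncreaseLCSOptimized, waysToIncreaseLCSOptimized_alt]
  apply PySem.List.foldl_congr_mem
  intro acc ii hii
  rw [PySem.List.mem_pyRange_one] at hii
  apply PySem.List.foldl_congr_mem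
  intro acc2 jj hjj
  rw [PySem.List.mem_pyRange_one] at hjj
  obtain ⟨i, rfl, him⟩ : ∃ i : Nat, (i : Int) = ii ∧ i ≤ str1.toList.length :=
    ⟨ii.toNat, Int.toNat_of_nonneg hii.1, by omega⟩
  obtain ⟨j, rfl, hjm⟩ : ∃ j : Nat, (j : Int) = jj ∧ j ≤ str2.toList.length :=
    ⟨jj.toNat, Int.toNat_of_nonneg hjj.1, by omega⟩
  simp only [Int.toNat_natCast]
  rw [pvCharFold str1.toList str2.toList i j _ acc2]
  have e1 : PySem.List.pyGetD (PySem.List.pyGetD (pvFillFwd str1.toList str2.toList) (i : Int) []) (j : Int) 0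
      = pvLcs str1.toList str2.toList i j := by
    rw [PySem.List.pyGetD_natCast, PySem.List.pyGetD_natCast]
    exact pvFillFwd_eq _ _ _ _ him hjm
  have e2 : PySem.List.pyGetD (PySem.List.pyGetD (pvFillFwd str1.toList str2.toList)
        (str1.toList.length : Int) []) (str2.toList.length : Int) 0
      = pvLcs str1.toList str2.toList str1.toList.length str2.toList.length := by
    rw [PySem.List.pyGetD_natCast, PySem.List.pyGetD_natCast]
    exact pvFillFwd_eq _ _ _ _ le_rfl le_rfl
  have e3 : PySem.List.pyGetD (PySem.List.pyGetD (pvFillBwd str1.toList str2.toList) (i : Int) []) (j : Int) 0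
      = pvS str1.toList str2.toList i j := by
    rw [PySem.List.pyGetD_natCast, PySem.List.pyGetD_natCast]
    exact pvFillBwd_eq _ _ _ _ him hjm
  have b1 : PySem.List.pyGetD (PySem.List.pyGetD (pvLcsRows str1.toList str2.toList) (i : Int) []) (j : Int) 0
      = pvLcs str1.toList str2.toList i j := by
    rw [pvLcsRows_eq, PySem.List.pyGetD_natCast, PySem.List.pyGetD_natCast,
        PySem.List.getD_map_range _ _ _ _ (show i < str1.toList.length + 1 by omega)]
    exact PySem.List.getD_map_range _ _ _ _ (by omega)
  have b2 : PySem.List.pyGetD (PySem.List.pyGetD (pvLcsRows str1.toList str2.toList)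
        (str1.toList.length : Int) []) (str2.toList.length : Int) 0
      = pvLcs str1.toList str2.toList str1.toList.length str2.toList.length := by
    rw [pvLcsRows_eq, PySem.List.pyGetD_natCast, PySem.List.pyGetD_natCast,
        PySem.List.getD_map_range _ _ _ _ (show str1.toList.length < str1.toList.length + 1 by omega)]
    exact PySem.List.getD_map_range _ _ _ _ (by omega)
  have b3 : PySem.List.pyGetD (PySem.List.pyGetD (pvLcsRows str1.toList.reverse str2.toList.reverse)
        ((str1.toList.length - i : Nat) : Int) []) ((str2.toList.length - j : Nat) : Int) 0
      = pvS str1.toList str2.toList i j := by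
    have hstep : PySem.List.pyGetD (PySem.List.pyGetD (pvLcsRows str1.toList.reverse str2.toList.reverse)
          ((str1.toList.length - i : Nat) : Int) []) ((str2.toList.length - j : Nat) : Int) 0
        = pvLcs str1.toList.reverse str2.toList.reverse (str1.toList.length - i) (str2.toList.length - j) := by
      rw [pvLcsRows_eq, PySem.List.pyGetD_natCast, PySem.List.pyGetD_natCast,
          PySem.List.getD_map_range _ _ _ _
            (show str1.toList.length - i < str1.toList.reverse.length + 1 by
              rw [List.length_reverse]; omega)]
      exact PySem.List.getD_map_range _ _ _ _ (by rw [List.length_reverse]; omega)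
    rw [hstep]
    simp [pvS]
  rw [e1, e2, e3, b1, b2, b3, PySem.Set.len_eq, pvLen_union]
  simp only [pvExcl]
  rfl

-- ===== VERDICT (by name: the statement is the Claim_ definition above) =====
theorem waysToIncreaseLCSOptimized_spec : Claim_equal_waysToIncreaseLCSOptimized := by
  intro str1 str2 _
  exact pvMain str1 str2
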